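-- pv_equiv track=rewrite | github.com/distorx/dbairag | backend/app/services/hint_service.py | _identify_pattern_type
-- ===== SOURCE A (Python) =====
-- def _identify_pattern_type(prompt: str) -> str:
--     """Identify the pattern type from a prompt"""
--
--     if any(word in prompt for word in ['select', 'show', 'get', 'list']):
--         if 'join' in prompt or 'with' in prompt:
--             return 'join'
--         elif any(word in prompt for word in ['count', 'sum', 'avg', 'max', 'min']):
--             return 'aggregate'
--         else:
--             return 'select'
--     elif any(word in prompt for word in ['insert', 'add', 'create']):
--         return 'insert'
--     elif any(word in prompt for word in ['update', 'modify', 'change']):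
--         return 'update'
--     elif any(word in prompt for word in ['delete', 'remove']):
--         return 'delete'
--     else:
--         return 'other'
-- ===== SOURCE B (Python) =====
-- # Single left-to-right scan over the prompt collecting which keyword
-- # categories occur, then one priority resolution over the collected set.
-- _KEYWORDS = [
--     ('select', 'sel'), ('show', 'sel'), ('get', 'sel'), ('list', 'sel'),
--     ('join', 'join'), ('with', 'join'),
--     ('count', 'agg'), ('sum', 'agg'), ('avg', 'agg'), ('max', 'agg'), ('min', 'agg'),
--     ('insert', 'ins'), ('add', 'ins'), ('create', 'ins'),
--     ('update', 'upd'), ('modify', 'upd'), ('change', 'upd'),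
--     ('delete', 'del'), ('remove', 'del'),
-- ]
--
--
-- def _identify_pattern_type(prompt: str) -> str:
--     """Identify the pattern type from a prompt (scan once, then resolve)."""
--     found = set()
--     for i in range(len(prompt)):
--         for word, cat in _KEYWORDS:
--             if prompt.startswith(word, i):
--                 found.add(cat)
--     if 'sel' in found:
--         if 'join' in found:
--             return 'join'
--         if 'agg' in found:
--             return 'aggregate'
--         return 'select'
--     if 'ins' in found:
--         return 'insert'
--     if 'upd' in found:
--         return 'update'
--     if 'del' in found:
--         return 'delete'
--     return 'other'
-- ===== Notes on version B (the rewrite author's own statement) =====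
-- stated objective: alternative
-- what changed: Instead of chained per-keyword substring tests, B makes a single left-to-right scan over the prompt positions, collecting into a set which keyword categories occur (via a keyword-to-category table), and then resolves the priority once over that set.
import Mathlib
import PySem

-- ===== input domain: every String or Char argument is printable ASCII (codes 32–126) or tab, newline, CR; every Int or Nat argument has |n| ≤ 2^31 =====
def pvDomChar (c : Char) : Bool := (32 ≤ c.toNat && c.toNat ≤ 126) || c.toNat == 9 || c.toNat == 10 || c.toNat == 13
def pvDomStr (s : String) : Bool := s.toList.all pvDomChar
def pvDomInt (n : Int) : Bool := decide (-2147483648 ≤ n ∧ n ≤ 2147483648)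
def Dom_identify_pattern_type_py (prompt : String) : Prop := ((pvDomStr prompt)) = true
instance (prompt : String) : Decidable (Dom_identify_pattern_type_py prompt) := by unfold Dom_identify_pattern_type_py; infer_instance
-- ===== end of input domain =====

-- B replaces A's chained substring tests by one left-to-right scan collecting the occurring keyword categories into a set, then a single priority resolution (alternative decomposition, same cost).

-- ===== PORT A =====
def identify_pattern_type_py (prompt : String) : String :=
  if ["select", "show", "get", "list"].any (fun w => PySem.Str.isIn w prompt) then
    if PySem.Str.isIn "join" prompt || PySem.Str.isIn "with" prompt then "join"
    else if ["count", "sum", "avg", "max", "min"].any (fun w => PySem.Str.isIn w prompt) then "aggregate"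
    else "select"
  else if ["insert", "add", "create"].any (fun w => PySem.Str.isIn w prompt) then "insert"
  else if ["update", "modify", "change"].any (fun w => PySem.Str.isIn w prompt) then "update"
  else if ["delete", "remove"].any (fun w => PySem.Str.isIn w prompt) then "delete"
  else "other"

-- ===== PORT B =====
def pvKeywords : List (String × String) :=
  [("select", "sel"), ("show", "sel"), ("get", "sel"), ("list", "sel"),
   ("join", "join"), ("with", "join"),
   ("count", "agg"), ("sum", "agg"), ("avg", "agg"), ("max", "agg"), ("min", "agg"),
   ("insert", "ins"), ("add", "ins"), ("create", "ins"),
   ("update", "upd"), ("modify", "upd"), ("change", "upd"),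
   ("delete", "del"), ("remove", "del")]

-- Python's prompt.startswith(word, i) with 0 ≤ i is ported by hand as startswith on the
-- i-dropped character list (exact: for 0 ≤ i, startswith(w, i) tests w against prompt[i:]).
def identify_pattern_type_py_alt (prompt : String) : String :=
  let L := prompt.toList
  let found : PySem.Set String :=
    (List.range L.length).foldl (fun s i =>
      pvKeywords.foldl (fun s p =>
        if PySem.Chars.startswith (L.drop i) p.1.toList then PySem.Set.add s p.2 else s) s)
      PySem.Set.empty
  if PySem.Set.contains found "sel" then
    if PySem.Set.contains found "join" then "join"
    else if PySem.Set.contains found "agg" then "aggregate"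
    else "select"
  else if PySem.Set.contains found "ins" then "insert"
  else if PySem.Set.contains found "upd" then "update"
  else if PySem.Set.contains found "del" then "delete"
  else "other"

-- ===== PRECONDITION & SPEC =====
def Spec_identify_pattern_type_py (prompt : String) (out : String) : Prop := out = identify_pattern_type_py_alt prompt
instance (prompt : String) (out : String) : Decidable (Spec_identify_pattern_type_py prompt out) := by unfold Spec_identify_pattern_type_py; infer_instance

-- ===== CLAIM (what is proved, stated in full; the proofs are below) =====
def Claim_equal_identify_pattern_type_py : Prop := ∀ (prompt : String), Dom_identify_pattern_type_py prompt → Spec_identify_pattern_type_py prompt (identify_pattern_type_py prompt)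

-- ===== LEMMAS AND PROOFS =====

-- membership in the inner fold over the keyword table
theorem pv_mem_inner (P : String × String → Bool) (l : List (String × String))
    (s : PySem.Set String) (c : String) :
    (c ∈ l.foldl (fun s p => if P p then PySem.Set.add s p.2 else s) s) ↔
      c ∈ s ∨ ∃ p ∈ l, P p = true ∧ p.2 = c := by
  induction l generalizing s with
  | nil => simp
  | cons p l ih =>
    simp only [List.foldl_cons, ih, List.mem_cons]
    split_ifs with h
    · rw [PySem.Set.mem_add]
      constructor
      · rintro ((hs | hc) | ⟨q, hq, hPq, hqc⟩)
        · exact Or.inl hs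
        · exact Or.inr ⟨p, Or.inl rfl, h, hc.symm⟩
        · exact Or.inr ⟨q, Or.inr hq, hPq, hqc⟩
      · rintro (hs | ⟨q, (rfl | hq), hPq, hqc⟩)
        · exact Or.inl (Or.inl hs)
        · exact Or.inl (Or.inr hqc.symm)
        · exact Or.inr ⟨q, hq, hPq, hqc⟩
    · constructor
      · rintro (hs | ⟨q, hq, hPq, hqc⟩)
        · exact Or.inl hs
        · exact Or.inr ⟨q, Or.inr hq, hPq, hqc⟩
      · rintro (hs | ⟨q, (rfl | hq), hPq, hqc⟩)
        · exact Or.inl hs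
        · exact absurd hPq (by simp [h])
        · exact Or.inr ⟨q, hq, hPq, hqc⟩

-- membership in the outer scan over the positions
theorem pv_mem_scan (L : List Char) (idxs : List Nat) (s : PySem.Set String) (c : String) :
    (c ∈ idxs.foldl (fun s i =>
        pvKeywords.foldl (fun s p =>
          if PySem.Chars.startswith (L.drop i) p.1.toList then PySem.Set.add s p.2 else s) s) s) ↔
      c ∈ s ∨ ∃ i ∈ idxs, ∃ p ∈ pvKeywords,
        PySem.Chars.startswith (L.drop i) p.1.toList = true ∧ p.2 = c := by
  induction idxs generalizing s with
  | nil => simp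
  | cons i idxs ih =>
    simp only [List.foldl_cons, ih, pv_mem_inner, List.mem_cons]
    constructor
    · rintro ((hs | ⟨p, hp, hP, hc⟩) | ⟨j, hj, p, hp, hP, hc⟩)
      · exact Or.inl hs
      · exact Or.inr ⟨i, Or.inl rfl, p, hp, hP, hc⟩
      · exact Or.inr ⟨j, Or.inr hj, p, hp, hP, hc⟩
    · rintro (hs | ⟨j, (rfl | hj), p, hp, hP, hc⟩)
      · exact Or.inl (Or.inl hs)
      · exact Or.inl (Or.inr ⟨p, hp, hP, hc⟩)
      · exact Or.inr ⟨j, hj, p, hp, hP, hc⟩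

-- scanning all positions finds a nonempty word exactly when it is a substring
theorem pv_exists_startswith (L : List Char) (w : List Char) (hw : w ≠ []) :
    (∃ i ∈ List.range L.length, PySem.Chars.startswith (L.drop i) w = true) ↔
      PySem.Chars.isIn w L = true := by
  rw [← PySem.Chars.exists_prefix_drop_iff_isIn]
  constructor
  · rintro ⟨i, _, h⟩
    exact ⟨i, (PySem.Chars.startswith_iff _ _).1 h⟩
  · rintro ⟨j, hj⟩
    by_cases hlt : j < L.length
    · exact ⟨j, List.mem_range.2 hlt, (PySem.Chars.startswith_iff _ _).2 hj⟩
    · exfalso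
      rw [List.drop_eq_nil_of_le (Nat.le_of_not_lt hlt)] at hj
      exact hw (List.prefix_nil.1 hj)

-- the collected set contains a category iff one of its keywords occurs in the prompt
theorem pv_found_cat (L : List Char) (c : String) :
    (c ∈ (List.range L.length).foldl (fun s i =>
      pvKeywords.foldl (fun s p =>
        if PySem.Chars.startswith (L.drop i) p.1.toList then PySem.Set.add s p.2 else s) s)
      PySem.Set.empty) ↔ ∃ p ∈ pvKeywords, p.2 = c ∧ PySem.Chars.isIn p.1.toList L = true := by
  rw [pv_mem_scan]
  simp only [PySem.Set.empty, List.not_mem_nil, false_or]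
  constructor
  · rintro ⟨i, hi, p, hp, hP, hc⟩
    refine ⟨p, hp, hc, ?_⟩
    have hw : p.1.toList ≠ [] := by fin_cases hp <;> simp
    exact (pv_exists_startswith L _ hw).1 ⟨i, hi, hP⟩
  · rintro ⟨p, hp, hc, hin⟩
    have hw : p.1.toList ≠ [] := by fin_cases hp <;> simp
    obtain ⟨i, hi, hP⟩ := (pv_exists_startswith L _ hw).2 hin
    exact ⟨i, hi, p, hp, hP, hc⟩

-- Set.contains is membership
theorem pv_contains_mem (s : PySem.Set String) (c : String) :
    PySem.Set.contains s c = true ↔ c ∈ s := by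
  rw [show PySem.Set.contains s c = List.contains s c from rfl]
  exact List.contains_iff_mem

-- Bool form: contains of the collected set equals the disjunction of the keyword tests
theorem pv_contains_eq (prompt : String) (c : String) :
    PySem.Set.contains
      ((List.range prompt.toList.length).foldl (fun s i =>
        pvKeywords.foldl (fun s p =>
          if PySem.Chars.startswith (prompt.toList.drop i) p.1.toList then PySem.Set.add s p.2 else s) s)
        PySem.Set.empty) c
      = ((pvKeywords.filter (fun p => p.2 == c)).any (fun p => PySem.Str.isIn p.1 prompt)) := by
  rw [Bool.eq_iff_iff, pv_contains_mem, pv_found_cat]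
  simp only [List.any_eq_true, List.mem_filter, PySem.Str.isIn_eq, beq_iff_eq]
  constructor
  · rintro ⟨p, hp, hc, hin⟩; exact ⟨p, ⟨hp, hc⟩, hin⟩
  · rintro ⟨p, ⟨hp, hc⟩, hin⟩; exact ⟨p, hp, hc, hin⟩

-- ===== VERDICT (by name: the statement is the Claim_ definition above) =====
theorem identify_pattern_type_py_spec : Claim_equal_identify_pattern_type_py := by
  intro prompt _
  unfold Spec_identify_pattern_type_py identify_pattern_type_py identify_pattern_type_py_alt
  simp only [pv_contains_eq]
  simp [pvKeywords, PySem.Str.isIn_eq]
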